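-- pv_equiv track=rewrite | github.com/lucinamay/biosynfoni | inoutput.py | entry_parser
-- ===== SOURCE A (Python) =====
-- def entry_parser(lines:list, entry_sep:str = "$$$$") -> list[list]:
--     entries = []
--     current_entry = []
--     for line in lines:
--         current_entry.append(line)
--         if line == entry_sep:
--             entries.append(current_entry)
--             current_entry = []  #new entry
--     return entries
-- ===== SOURCE B (Python) =====
-- def entry_parser(lines: list, entry_sep: str = "$$$$") -> list[list]:
--     # Split-at-first-separator decomposition: repeatedly find the next
--     # separator and slice off the entry (separator line included);
--     # lines after the last separator are dropped.
--     entries = []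
--     rest = lines
--     while entry_sep in rest:
--         i = rest.index(entry_sep)
--         entries.append(rest[:i + 1])
--         rest = rest[i + 1:]
--     return entries
-- ===== Notes on version B (the rewrite author's own statement) =====
-- stated objective: alternative
-- what changed: Replaces the running line-accumulator fold with repeated split-at-first-separator: find the next separator index and slice the entry off the remaining list.
import Mathlib
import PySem

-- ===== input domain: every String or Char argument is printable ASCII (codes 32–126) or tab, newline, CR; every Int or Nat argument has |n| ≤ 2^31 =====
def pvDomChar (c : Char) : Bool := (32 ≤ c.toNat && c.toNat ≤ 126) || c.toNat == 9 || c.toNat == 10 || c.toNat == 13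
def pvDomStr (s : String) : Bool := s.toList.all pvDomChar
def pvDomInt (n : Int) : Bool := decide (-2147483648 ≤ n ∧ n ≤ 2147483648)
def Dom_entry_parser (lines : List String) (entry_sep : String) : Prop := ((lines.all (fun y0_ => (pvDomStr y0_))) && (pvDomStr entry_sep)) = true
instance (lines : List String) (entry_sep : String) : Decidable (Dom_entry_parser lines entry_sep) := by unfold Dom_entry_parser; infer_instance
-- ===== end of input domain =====

-- B replaces A's running line-accumulator fold with repeated split-at-first-separator
-- (find the next separator index, slice the entry off the remaining list); same cost, alternative decomposition.


-- ===== PORT A =====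
def entry_parser (lines : List String) (entry_sep : String) : List (List String) :=
  (lines.foldl
    (fun (st : List (List String) × List String) line =>
      let current_entry := st.2 ++ [line]
      if line == entry_sep then (st.1 ++ [current_entry], ([] : List String))
      else (st.1, current_entry))
    (([] : List (List String)), ([] : List String))).1

-- ===== PORT B =====
-- the 'while entry_sep in rest: i = rest.index(entry_sep)' pair is ported as one match on
-- PySem.List.index? (some ↔ membership, exact same first-occurrence index)
def epGo (entry_sep : String) (entries : List (List String)) (rest : List String) :
    List (List String) :=
  match h : PySem.List.index? rest entry_sep with
  | none => entries
  | some i =>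
      epGo entry_sep (entries ++ [PySem.List.slice rest none (some ((i : Int) + 1))])
        (PySem.List.slice rest (some ((i : Int) + 1)) none)
termination_by rest.length
decreasing_by
  obtain ⟨hk, -, -⟩ := PySem.List.getElem_of_index?_eq_some h
  rw [PySem.List.slice_from rest (by positivity)]
  simp only [List.length_drop]
  omega

def entry_parser_alt (lines : List String) (entry_sep : String) : List (List String) :=
  epGo entry_sep [] lines

-- ===== PRECONDITION & SPEC =====
def Spec_entry_parser (lines : List String) (entry_sep : String) (out : List (List String)) : Prop := out = entry_parser_alt lines entry_sep
instance (lines : List String) (entry_sep : String) (out : List (List String)) : Decidable (Spec_entry_parser lines entry_sep out) := by unfold Spec_entry_parser; infer_instance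

-- ===== CLAIM (what is proved, stated in full; the proofs are below) =====
def Claim_equal_entry_parser : Prop := ∀ (lines : List String) (entry_sep : String), Dom_entry_parser lines entry_sep → Spec_entry_parser lines entry_sep (entry_parser lines entry_sep)

-- ===== LEMMAS AND PROOFS =====

/-- Common recursive characterisation of the result: first entry is the prefix up to
and including the first separator, the tail after the last separator is dropped. -/
def epSpec (sep : String) : List String → List (List String)
  | [] => []
  | l :: rest =>
      if l = sep then [l] :: epSpec sep rest
      else
        match epSpec sep rest with
        | [] => []
        | e :: es => (l :: e) :: es

/-- Prepend `cur` onto the first entry (A's pending accumulator). -/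
def consFirst (cur : List String) : List (List String) → List (List String)
  | [] => []
  | e :: es => (cur ++ e) :: es

theorem consFirst_nil (xs : List (List String)) : consFirst [] xs = xs := by
  cases xs <;> simp [consFirst]

theorem foldlA_eq (sep : String) (rest : List String) :
    ∀ (entries : List (List String)) (cur : List String),
      (rest.foldl
        (fun (st : List (List String) × List String) line =>
          let current_entry := st.2 ++ [line]
          if line == sep then (st.1 ++ [current_entry], ([] : List String))
          else (st.1, current_entry))
        (entries, cur)).1 = entries ++ consFirst cur (epSpec sep rest) := by
  induction rest with
  | nil => intro entries cur; simp [epSpec, consFirst]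
  | cons l rest ih =>
      intro entries cur
      by_cases hl : l = sep
      · simp only [List.foldl_cons, hl, beq_self_eq_true, if_true]
        rw [ih, consFirst_nil, epSpec]
        simp [consFirst]
      · simp only [List.foldl_cons, beq_eq_false_iff_ne.mpr hl]
        rw [ih, epSpec, if_neg hl]
        cases hr : epSpec sep rest with
        | nil => simp [consFirst]
        | cons e es => simp [consFirst]

theorem epSpec_eq_nil_of_not_mem (sep : String) (rest : List String) (h : sep ∉ rest) :
    epSpec sep rest = [] := by
  induction rest with
  | nil => rfl
  | cons l rest ih =>
      simp only [List.mem_cons, not_or] at h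
      rw [epSpec, if_neg (fun he => h.1 he.symm), ih h.2]

theorem epSpec_split (sep : String) (pre suf : List String) (h : sep ∉ pre) :
    epSpec sep (pre ++ sep :: suf) = (pre ++ [sep]) :: epSpec sep suf := by
  induction pre with
  | nil => simp [epSpec]
  | cons p pre ih =>
      simp only [List.mem_cons, not_or] at h
      rw [List.cons_append, epSpec, if_neg (fun he => h.1 he.symm), ih h.2]
      simp

theorem epGo_eq (sep : String) : ∀ (n : Nat) (rest : List String), rest.length ≤ n →
    ∀ (entries : List (List String)), epGo sep entries rest = entries ++ epSpec sep rest := by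
  intro n
  induction n with
  | zero =>
      intro rest hlen entries
      have : rest = [] := List.eq_nil_of_length_eq_zero (Nat.le_zero.mp hlen)
      subst this
      rw [epGo, epSpec]
      simp [PySem.List.index?_eq_idxOf?]
  | succ n ih =>
      intro rest hlen entries
      rw [epGo]
      split
      next h =>
          rw [epSpec_eq_nil_of_not_mem sep rest
            ((PySem.List.index?_eq_none_iff rest sep).mp h), List.append_nil]
      next i h =>
          obtain ⟨pre, suf, hsplit, hpre, hnot⟩ := (PySem.List.index?_eq_some_iff _ _ _).mp h
          have hto : PySem.List.slice rest none (some ((i : Int) + 1)) = pre ++ [sep] := by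
            rw [PySem.List.slice_to rest (by positivity), hsplit]
            have : ((i : Int) + 1).toNat = pre.length + 1 := by omega
            rw [this]
            simp [List.take_append]
          have hfrom : PySem.List.slice rest (some ((i : Int) + 1)) none = suf := by
            rw [PySem.List.slice_from rest (by positivity), hsplit]
            have : ((i : Int) + 1).toNat = pre.length + 1 := by omega
            rw [this]
            simp [List.drop_append]
          have hsuf : suf.length ≤ n := by
            have := congrArg List.length hsplit
            simp at this
            omega
          rw [hto, hfrom, ih suf hsuf, hsplit, epSpec_split sep pre suf hnot]
          simp

-- ===== VERDICT (by name: the statement is the Claim_ definition above) =====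
theorem entry_parser_spec : Claim_equal_entry_parser := by
  intro lines entry_sep _
  unfold Spec_entry_parser entry_parser entry_parser_alt
  rw [foldlA_eq, consFirst_nil, epGo_eq entry_sep lines.length lines le_rfl,
    List.nil_append]
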